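-- pv_equiv track=rewrite | github.com/trislaz/zotero_search | cluster.py | make_text_fittable
-- ===== SOURCE A (Python) =====
-- def make_text_fittable(text, n_words_per_line=10):
--     text = text.split('<br>')
--     T = ""
--     for t in text:
--         add = t.split(' ')
--         add = [' '.join(add[i:i+n_words_per_line]) for i in range(0, len(add), n_words_per_line)]
--         add = '<br>'.join(add)
--         T += add + '<br>'
--     return T
-- ===== SOURCE B (Python) =====
-- def make_text_fittable(text, n_words_per_line=10):
--     lines = []
--     for seg in text.split('<br>'):
--         buf = []
--         count = 0
--         for w in seg.split(' '):
--             buf.append(w)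
--             count += 1
--             if count == n_words_per_line:
--                 lines.append(' '.join(buf))
--                 buf = []
--                 count = 0
--         if buf:
--             lines.append(' '.join(buf))
--     return '<br>'.join(lines) + '<br>'
-- ===== Notes on version B (the rewrite author's own statement) =====
-- stated objective: alternative
-- what changed: A rebuilds each segment via index slicing (range(0,len,n) plus add[i:i+n] list slices, a nested join per segment, and repeated string concatenation); B makes a single left-to-right streaming pass per segment with a word buffer and counter, collects all lines of all segments into one flat list, and joins once at the end.
-- outside the precondition, e.g. on make_text_fittable('a b', -1): A returns '<br>', B returns 'a b<br>'
import Mathlib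
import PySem

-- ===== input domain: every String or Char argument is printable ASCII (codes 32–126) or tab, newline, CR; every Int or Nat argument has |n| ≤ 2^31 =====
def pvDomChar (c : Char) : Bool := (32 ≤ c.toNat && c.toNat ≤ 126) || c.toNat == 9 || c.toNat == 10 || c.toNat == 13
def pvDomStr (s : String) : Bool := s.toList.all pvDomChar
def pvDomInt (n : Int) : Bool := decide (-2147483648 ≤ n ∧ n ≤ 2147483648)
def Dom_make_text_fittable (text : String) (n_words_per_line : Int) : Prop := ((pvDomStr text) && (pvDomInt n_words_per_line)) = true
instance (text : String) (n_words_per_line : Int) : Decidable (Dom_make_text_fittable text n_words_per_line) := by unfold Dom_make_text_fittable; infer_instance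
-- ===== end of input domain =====

-- B rewraps by one streaming pass per segment with a word buffer and counter, collecting
-- all lines into one flat list joined once, instead of A's range/slice chunking with a
-- nested join and repeated string concatenation (alternative decomposition, same cost).

-- ===== PORT A =====
-- loop body of A: add = t.split(' '); add = [' '.join(add[i:i+n]) for i in range(0, len(add), n)]; '<br>'.join(add)
def pvASeg (n : Int) (t : List Char) : List Char :=
  let add := PySem.Chars.splitOn t [' ']
  let add2 := (PySem.List.pyRange 0 (add.length : Int) n).map
    (fun i => PySem.Chars.join [' '] (PySem.List.slice add (some i) (some (i + n))))
  PySem.Chars.join "<br>".toList add2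

def make_text_fittable (text : String) (n_words_per_line : Int) : String :=
  let segs := PySem.Chars.splitOn text.toList "<br>".toList
  String.ofList (segs.foldl (fun T t => T ++ (pvASeg n_words_per_line t ++ "<br>".toList)) [])

-- ===== PORT B =====
-- inner-loop body of B: buf.append(w); count += 1; if count == n: flush the buffer as a line
def pvBStep (n : Int) (st : List (List Char) × List (List Char) × Int) (w : List Char) :
    List (List Char) × List (List Char) × Int :=
  let buf := st.2.1 ++ [w]
  let count := st.2.2 + 1
  if count = n then (st.1 ++ [PySem.Chars.join [' '] buf], ([], 0)) else (st.1, (buf, count))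

-- after the segment's words: if buf: lines.append(' '.join(buf))
def pvBFlush (st : List (List Char) × List (List Char) × Int) : List (List Char) :=
  if st.2.1.isEmpty then st.1 else st.1 ++ [PySem.Chars.join [' '] st.2.1]

-- one segment of B's outer loop
def pvBSeg (n : Int) (lines : List (List Char)) (seg : List Char) : List (List Char) :=
  pvBFlush ((PySem.Chars.splitOn seg [' ']).foldl (pvBStep n) (lines, ([], 0)))

def make_text_fittable_alt (text : String) (n_words_per_line : Int) : String :=
  let lines := (PySem.Chars.splitOn text.toList "<br>".toList).foldl (pvBSeg n_words_per_line) []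
  String.ofList (PySem.Chars.join "<br>".toList lines ++ "<br>".toList)

-- ===== PRECONDITION & SPEC =====
-- Pre_ restricts to a positive words-per-line, the function's natural domain: n = 0 makes
-- A's range(0, len, 0) raise ValueError, and for negative n A's range is empty, so A
-- silently drops all words and returns only the empty-line separators (see claim cites).
def Pre_make_text_fittable (text : String) (n_words_per_line : Int) : Prop :=
  1 ≤ n_words_per_line
instance (text : String) (n_words_per_line : Int) : Decidable (Pre_make_text_fittable text n_words_per_line) := by unfold Pre_make_text_fittable; infer_instance

def pvWitness_make_text_fittable : String × Int := ("hello world this is text<br>more text", 2)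

def Spec_make_text_fittable (text : String) (n_words_per_line : Int) (out : String) : Prop := out = make_text_fittable_alt text n_words_per_line
instance (text : String) (n_words_per_line : Int) (out : String) : Decidable (Spec_make_text_fittable text n_words_per_line out) := by unfold Spec_make_text_fittable; infer_instance

-- ===== CLAIM (what is proved, stated in full; the proofs are below) =====
def Claim_equal_make_text_fittable : Prop := ∀ (text : String) (n_words_per_line : Int), Dom_make_text_fittable text n_words_per_line → Pre_make_text_fittable text n_words_per_line → Spec_make_text_fittable text n_words_per_line (make_text_fittable text n_words_per_line)

-- ===== LEMMAS AND PROOFS =====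

-- the common grouping both sides compute per segment: lines of k+1 words each
def chunkJoin (k : Nat) : List (List Char) → List (List Char)
  | [] => []
  | w :: ws => PySem.Chars.join [' '] ((w :: ws).take (k + 1)) :: chunkJoin k ((w :: ws).drop (k + 1))
termination_by ws => ws.length
decreasing_by simp

theorem splitOn_go_ne_nil (sep : List Char) (fuel : Nat) (l cur : List Char)
    (acc : List (List Char)) : PySem.Chars.splitOn.go sep fuel l cur acc ≠ [] := by
  induction fuel generalizing l cur acc with
  | zero => simp [PySem.Chars.splitOn.go]
  | succ fuel ih =>
    cases l with
    | nil => simp [PySem.Chars.splitOn.go]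
    | cons c rest =>
      rw [PySem.Chars.splitOn.go]
      split
      · exact ih _ _ _
      · exact ih _ _ _
theorem splitOn_ne_nil (s sep : List Char) : PySem.Chars.splitOn s sep ≠ [] :=
  splitOn_go_ne_nil sep _ s [] []
theorem chunkJoin_ne_nil (k : Nat) (ws : List (List Char)) (h : ws ≠ []) :
    chunkJoin k ws ≠ [] := by
  cases ws with
  | nil => cases h rfl
  | cons w tl => simp [chunkJoin]
theorem pyRange_pos_nil (b s : Int) (hs : 0 < s) (hb : b ≤ 0) :
    PySem.List.pyRange 0 b s = [] := by
  simp only [PySem.List.pyRange]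
  rw [if_neg (by omega : ¬ s = 0), if_pos hs, if_neg (by omega : ¬ (0:Int) < b)]
  simp
theorem pyRange_pos_zero_cons (b s : Int) (hs : 0 < s) (hb : 0 < b) :
    PySem.List.pyRange 0 b s = 0 :: (PySem.List.pyRange 0 (b - s) s).map (· + s) := by
  simp only [PySem.List.pyRange]
  rw [if_neg (by omega : ¬ s = 0), if_neg (by omega : ¬ s = 0), if_pos hs, if_pos hs, if_pos hb]
  have hc : ((b - 0 + s - 1) / s).toNat
      = (if (0:Int) < b - s then ((b - s - 0 + s - 1) / s).toNat else 0) + 1 := by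
    by_cases h : (0:Int) < b - s
    · rw [if_pos h]
      have h1 : b - 0 + s - 1 = (b - s - 0 + s - 1) + 1 * s := by ring
      rw [h1, Int.add_mul_ediv_right _ _ (by omega : s ≠ 0)]
      have h2 : 0 ≤ (b - s - 0 + s - 1) / s := Int.ediv_nonneg (by omega) (by omega)
      omega
    · rw [if_neg h]
      have h1 : b - 0 + s - 1 = (b - 1) + 1 * s := by ring
      rw [h1, Int.add_mul_ediv_right _ _ (by omega : s ≠ 0)]
      have h2 : (b - 1) / s = 0 := Int.ediv_eq_zero_of_lt (by omega) (by omega)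
      omega
  rw [hc, List.range_succ_eq_map]
  simp only [List.map_cons, List.map_map]
  congr 1
  · norm_num
  refine List.map_congr_left (fun a _ => ?_)
  simp only [Function.comp]
  push_cast
  ring
theorem aSeg_chunks (k : Nat) (ws : List (List Char)) :
    (PySem.List.pyRange 0 (ws.length : Int) ((k : Int) + 1)).map
      (fun i => PySem.Chars.join [' '] (PySem.List.slice ws (some i) (some (i + ((k : Int) + 1)))))
      = chunkJoin k ws := by
  induction ws using chunkJoin.induct (k := k) with
  | case1 => simp [chunkJoin, pyRange_pos_nil 0 ((k:Int)+1) (by omega) (by omega)]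
  | case2 w tl ih =>
    have hlen : 0 < ((w :: tl).length : Int) := by simp
    rw [pyRange_pos_zero_cons _ _ (by omega) hlen, List.map_cons, List.map_map, chunkJoin]
    congr 1
    · show PySem.Chars.join [' ']
        (PySem.List.slice (w :: tl) (some 0) (some (0 + ((k:Int)+1)))) = _
      have h0 : (0:Int) + ((k:Int)+1) = ((k+1 : Nat) : Int) := by push_cast; ring_nf
      rw [h0, PySem.List.slice_zero_start, PySem.List.slice_to_natCast]
    · by_cases hk : k + 1 ≤ (w :: tl).length
      · have hdl : ((List.drop (k+1) (w :: tl)).length : Int)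
            = ((w :: tl).length : Int) - ((k:Int)+1) := by
          rw [List.length_drop]; omega
        rw [← ih, hdl]
        refine List.map_congr_left (fun i hi => ?_)
        rw [PySem.List.mem_pyRange_iff_of_pos (by omega)] at hi
        obtain ⟨hi0, _, _⟩ := hi
        simp only [Function.comp]
        have hb1 : (0:Int) ≤ i + ((k:Int)+1) := by omega
        rw [PySem.List.slice_toNat _ hb1 (by omega), PySem.List.slice_toNat _ hi0 (by omega)]
        rw [List.drop_drop]
        congr 1
        congr 1
        · omega
        · congr 1
          omega
      · have hnil : List.drop (k+1) (w :: tl) = [] := List.drop_eq_nil_of_le (by omega)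
        have hlb : ((w :: tl).length : Int) - ((k:Int)+1) ≤ 0 := by
          have : (w :: tl).length ≤ k + 1 := by omega
          omega
        rw [pyRange_pos_nil _ _ (by omega) hlb, hnil]
        simp [chunkJoin]
theorem bStep_no_flush (k : Nat) (ws : List (List Char)) :
    ∀ (buf : List (List Char)) (lines : List (List Char)),
    buf.length + ws.length ≤ k →
    ws.foldl (pvBStep ((k : Int) + 1)) (lines, (buf, (buf.length : Int)))
      = (lines, (buf ++ ws, ((buf.length + ws.length : Nat) : Int))) := by
  induction ws with
  | nil => intro buf lines h; simp
  | cons w tl ih =>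
    intro buf lines h
    rw [List.foldl_cons]
    have hstep : pvBStep ((k : Int) + 1) (lines, (buf, (buf.length : Int))) w
        = (lines, (buf ++ [w], (((buf ++ [w]).length : Nat) : Int))) := by
      unfold pvBStep
      rw [if_neg (by simp at h ⊢; omega)]
      simp
    rw [hstep]
    have h2 := ih (buf ++ [w]) lines (by simp at h ⊢; omega)
    rw [h2]
    simp at h ⊢
    omega
theorem bSeg_chunks (k : Nat) (ws : List (List Char)) :
    ∀ lines, pvBFlush (ws.foldl (pvBStep ((k : Int) + 1)) (lines, ([], 0)))
      = lines ++ chunkJoin k ws := by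
  induction ws using chunkJoin.induct (k := k) with
  | case1 => intro lines; simp [pvBFlush, chunkJoin]
  | case2 w tl ih =>
    intro lines
    by_cases hk : (w :: tl).length ≤ k
    · have h0 := bStep_no_flush k (w :: tl) [] lines (by simpa using hk)
      simp only [List.length_nil, Nat.cast_zero, List.nil_append, Nat.zero_add] at h0
      rw [h0]
      have ht : (w :: tl).take (k + 1) = w :: tl := List.take_of_length_le (by omega)
      have hd : (w :: tl).drop (k + 1) = [] := List.drop_eq_nil_of_le (by omega)
      simp [pvBFlush, chunkJoin, ht, hd]
    · have hkk : k + 1 ≤ (w :: tl).length := by omega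
      have htake : ((w :: tl).take (k + 1)).foldl (pvBStep ((k : Int) + 1)) (lines, ([], 0))
          = (lines ++ [PySem.Chars.join [' '] ((w :: tl).take (k + 1))], ([], 0)) := by
        have hts : (w :: tl).take (k + 1) = (w :: tl).take k ++ [(w :: tl)[k]'(by omega)] := by
          rw [List.take_add_one, List.getElem?_eq_getElem (by omega)]
          rfl
        rw [hts, List.foldl_append]
        have hlk : ((w :: tl).take k).length = k := by rw [List.length_take]; omega
        have h0 := bStep_no_flush k ((w :: tl).take k) [] lines (by simp [hlk])
        simp only [List.length_nil, Nat.cast_zero, List.nil_append, Nat.zero_add] at h0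
        rw [h0, List.foldl_cons, List.foldl_nil]
        simp only [pvBStep, hlk]
        rw [← hts]
        simp
      conv_lhs => rw [show w :: tl = (w :: tl).take (k + 1) ++ (w :: tl).drop (k + 1) from
        (List.take_append_drop _ _).symm]
      rw [List.foldl_append, htake, ih]
      rw [chunkJoin]
      simp
theorem join_append (sep : List Char) (xs ys : List (List Char)) (hx : xs ≠ []) (hy : ys ≠ []) :
    PySem.Chars.join sep (xs ++ ys)
      = PySem.Chars.join sep xs ++ sep ++ PySem.Chars.join sep ys := by
  induction xs with
  | nil => cases hx rfl
  | cons x xs ih =>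
    cases xs with
    | nil =>
      cases ys with
      | nil => cases hy rfl
      | cons y ys =>
        rw [List.singleton_append, PySem.Chars.join_cons_cons, PySem.Chars.join_singleton]
    | cons x' xs' =>
      have ih' := ih (by simp)
      simp only [List.cons_append] at ih' ⊢
      rw [PySem.Chars.join_cons_cons, ih', PySem.Chars.join_cons_cons]
      simp [List.append_assoc]
theorem foldl_append_gen {α β : Type} (f : α → List β) (l : List α) (init : List β) :
    l.foldl (fun acc x => acc ++ f x) init = init ++ l.flatMap f := by
  induction l generalizing init with
  | nil => simp
  | cons x xs ih => simp [ih]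
theorem flatten_join (C : List Char → List (List Char)) (segs : List (List Char))
    (hs : segs ≠ []) (hC : ∀ t ∈ segs, C t ≠ []) :
    (segs.flatMap (fun t => PySem.Chars.join "<br>".toList (C t) ++ "<br>".toList))
      = PySem.Chars.join "<br>".toList (segs.flatMap C) ++ "<br>".toList := by
  induction segs with
  | nil => cases hs rfl
  | cons t rest ih =>
    cases rest with
    | nil => simp
    | cons t' rest' =>
      rw [List.flatMap_cons, ih (by simp) (fun x hx => hC x (by simp [hx]))]
      rw [List.flatMap_cons (xs := t' :: rest')]
      have hne : (t' :: rest').flatMap C ≠ [] := by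
        rw [List.flatMap_cons]
        intro hcon
        exact hC t' (by simp) (List.append_eq_nil_iff.mp hcon).1
      rw [join_append _ _ _ (hC t (by simp)) hne]
      simp [List.append_assoc]
theorem make_text_fittable_spec : Claim_equal_make_text_fittable := by
  unfold Claim_equal_make_text_fittable
  intro text n _ hpre
  unfold Pre_make_text_fittable at hpre
  unfold Spec_make_text_fittable
  obtain ⟨k, hk⟩ : ∃ k : Nat, n = (k : Int) + 1 := ⟨(n - 1).toNat, by omega⟩
  subst hk
  simp only [make_text_fittable, make_text_fittable_alt]
  congr 1
  have hA : ∀ t : List Char, pvASeg ((k : Int) + 1) t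
      = PySem.Chars.join "<br>".toList (chunkJoin k (PySem.Chars.splitOn t [' '])) := by
    intro t
    simp only [pvASeg]
    rw [aSeg_chunks]
  have e1 : (PySem.Chars.splitOn text.toList "<br>".toList).foldl
      (fun T t => T ++ (pvASeg ((k : Int) + 1) t ++ "<br>".toList)) []
      = (PySem.Chars.splitOn text.toList "<br>".toList).flatMap
          (fun t => PySem.Chars.join "<br>".toList (chunkJoin k (PySem.Chars.splitOn t [' '])) ++ "<br>".toList) := by
    rw [foldl_append_gen (fun t => pvASeg ((k : Int) + 1) t ++ "<br>".toList)]
    simp only [List.nil_append, hA]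
  have e2 : (PySem.Chars.splitOn text.toList "<br>".toList).foldl (pvBSeg ((k : Int) + 1)) []
      = (PySem.Chars.splitOn text.toList "<br>".toList).flatMap
          (fun t => chunkJoin k (PySem.Chars.splitOn t [' '])) := by
    have hfun : pvBSeg ((k : Int) + 1)
        = fun lines seg => lines ++ chunkJoin k (PySem.Chars.splitOn seg [' ']) :=
      funext fun l => funext fun s => bSeg_chunks k _ l
    rw [hfun, foldl_append_gen]
    simp
  rw [e1, e2,
    flatten_join _ _ (splitOn_ne_nil _ _)
      (fun t _ => chunkJoin_ne_nil k _ (splitOn_ne_nil t [' ']))]
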